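-- pv_equiv track=rewrite | github.com/devsoc-unsw/circles | backend/data/processors/syntax_parsing.py | do_brackets_match
-- ===== SOURCE A (Python) =====
-- def do_brackets_match(processed):
--     """
--     Checks whether brackets are valid and matching.
--     """
--
--     bracket_map = {"(": ")", "[": "]"}
--     closing = {")", "]"}
--     stack = []
--
--     for char in processed:
--
--         if char in bracket_map:
--             # Opening brackets
--             stack.append(char)
--
--         elif char in closing:
--             # Closing brackets
--             if len(stack) == 0:
--                 return False
--
--             popped = stack.pop()
--             if char != bracket_map[popped]:
--                 return False
--
--     if len(stack) != 0:
--         # Stack should be empty in the end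
--         return False
--
--     return True
-- ===== SOURCE B (Python) =====
-- def do_brackets_match(processed):
--     """
--     Checks whether brackets are valid and matching, by repeated cancellation:
--     keep only bracket characters, then delete adjacent matched pairs until
--     nothing changes; the string is balanced iff everything cancels.
--     """
--     s = [c for c in processed if c in '()[]']
--     while True:
--         t = []
--         i = 0
--         while i < len(s):
--             if i + 1 < len(s) and ((s[i] == '(' and s[i + 1] == ')')
--                                    or (s[i] == '[' and s[i + 1] == ']')):
--                 i += 2
--             else:
--                 t.append(s[i])
--                 i += 1
--         if t == s:
--             return s == []
--         s = t
-- ===== Notes on version B (the rewrite author's own statement) =====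
-- stated objective: alternative
-- what changed: Replaced the single-pass stack automaton with a fixed-point reduction: filter to bracket characters, then repeatedly delete adjacent matched open-close pairs until the list stops changing and test for emptiness; on typical flat inputs this does fewer per-character dict/set lookups, though its worst case is quadratic.
import Mathlib
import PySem

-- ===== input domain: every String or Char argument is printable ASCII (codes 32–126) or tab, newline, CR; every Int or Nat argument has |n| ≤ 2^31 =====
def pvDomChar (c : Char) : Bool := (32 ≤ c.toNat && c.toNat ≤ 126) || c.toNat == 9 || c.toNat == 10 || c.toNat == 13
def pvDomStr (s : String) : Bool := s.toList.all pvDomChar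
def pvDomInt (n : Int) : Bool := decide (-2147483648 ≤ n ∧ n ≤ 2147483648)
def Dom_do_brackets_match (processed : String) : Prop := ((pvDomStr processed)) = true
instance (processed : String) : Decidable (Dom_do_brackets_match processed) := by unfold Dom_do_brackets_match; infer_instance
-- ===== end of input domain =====

-- B replaces A's single-pass stack automaton by a fixed-point reduction (filter brackets,
-- repeatedly cancel adjacent matched pairs, test emptiness): an alternative algorithm, not faster.

-- ===== PORT A =====
-- bracket_map = {"(": ")", "[": "]"}
def pvBracketMap : PySem.Dict Char Char := ⟨[('(', ')'), ('[', ']')]⟩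
-- closing = {")", "]"}
def pvClosing : List Char := PySem.Set.ofList [')', ']']

-- the for-loop of A, with the stack as accumulator (Python appends/pops at the end;
-- here the head of the list is the top of the stack — the same stack)
def pvGoA : List Char → List Char → Bool
  | [], stack => stack.isEmpty
  | c :: rest, stack =>
    if pvBracketMap.contains c then
      pvGoA rest (c :: stack)
    else if pvClosing.contains c then
      match stack with
      | [] => false
      | popped :: stack' =>
        match pvBracketMap.get? popped with
        | none => false  -- unreachable: only keys of bracket_map are ever pushed (Python: KeyError)
        | some v => if c ≠ v then false else pvGoA rest stack'
    else pvGoA rest stack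

def do_brackets_match (processed : String) : Bool := pvGoA processed.toList []

-- ===== PORT B =====
-- one left-to-right pass of the inner while-loop of Source B: skip a matched adjacent pair, else keep the char
def pvRemovePairs : List Char → List Char
  | a :: b :: rest =>
    if (a == '(' && b == ')') || (a == '[' && b == ']') then pvRemovePairs rest
    else a :: pvRemovePairs (b :: rest)
  | l => l
termination_by l => l.length
decreasing_by all_goals (simp only [List.length_cons]; omega)

theorem pvRemovePairs_eq_or_lt (l : List Char) :
    pvRemovePairs l = l ∨ (pvRemovePairs l).length < l.length := by
  induction l using pvRemovePairs.induct with
  | case1 a b rest h ih =>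
    right
    rw [pvRemovePairs, if_pos h]
    have hle : (pvRemovePairs rest).length ≤ rest.length := by
      rcases ih with h' | h'
      · rw [h']
      · omega
    simp only [List.length_cons]; omega
  | case2 a b rest h ih =>
    rw [pvRemovePairs, if_neg h]
    rcases ih with h' | h'
    · left; rw [h']
    · right; simpa using h'
  | case3 l h => left; rw [pvRemovePairs.eq_def]; cases l with
      | nil => rfl
      | cons a t => cases t with
        | nil => rfl
        | cons b r => exact absurd rfl (h a b r)

-- the outer while-loop of Source B: iterate pvRemovePairs until it no longer changes the list
def pvReduceLoop (s : List Char) : List Char :=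
  let t := pvRemovePairs s
  if t = s then s else pvReduceLoop t
termination_by s.length
decreasing_by
  rcases pvRemovePairs_eq_or_lt s with h | h
  · exact absurd h (by assumption)
  · exact h

def do_brackets_match_alt (processed : String) : Bool :=
  let s := processed.toList.filter (fun c => c ∈ ['(', ')', '[', ']'])
  pvReduceLoop s == []

-- ===== PRECONDITION & SPEC =====
def Spec_do_brackets_match (processed : String) (out : Bool) : Prop := out = do_brackets_match_alt processed
instance (processed : String) (out : Bool) : Decidable (Spec_do_brackets_match processed out) := by unfold Spec_do_brackets_match; infer_instance

-- ===== CLAIM (what is proved, stated in full; the proofs are below) =====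
def Claim_equal_do_brackets_match : Prop := ∀ (processed : String), Dom_do_brackets_match processed → Spec_do_brackets_match processed (do_brackets_match processed)

-- ===== LEMMAS AND PROOFS =====

-- proof-side helpers: a normalized form of A's automaton, plain char comparisons
def pvIsBr (c : Char) : Bool := c ∈ ['(', ')', '[', ']']

def pvPair (a b : Char) : Bool := (a == '(' && b == ')') || (a == '[' && b == ']')

def pvGoN : List Char → List Char → Bool
  | [], st => st.isEmpty
  | c :: rest, st =>
    if c = '(' ∨ c = '[' then pvGoN rest (c :: st)
    else if c = ')' ∨ c = ']' then
      match st with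
      | [] => false
      | p :: st' => if pvPair p c then pvGoN rest st' else false
    else pvGoN rest st

def pvHasPair : List Char → Bool
  | a :: b :: rest => pvPair a b || pvHasPair (b :: rest)
  | _ => false

theorem pvGoA_eq_goN (l : List Char) (st : List Char) : pvGoA l st = pvGoN l st := by
  induction l generalizing st with
  | nil => rfl
  | cons c rest ih =>
    simp only [pvGoA, pvGoN]
    have hcont : pvBracketMap.contains c = (c = '(' ∨ c = '[' : Bool) := by
      simp [pvBracketMap, PySem.Dict.contains]
      by_cases h1 : c = '(' <;> by_cases h2 : c = '[' <;> simp [h1, h2, BEq.comm]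
    have hclos : pvClosing.contains c = (c = ')' ∨ c = ']' : Bool) := by
      by_cases h1 : c = ')' <;> by_cases h2 : c = ']' <;> simp [pvClosing, PySem.Set.ofList, h1, h2]
    rw [hcont, hclos]
    by_cases h1 : c = '(' ∨ c = '[' 
    · simp [h1, ih]
    · simp only [h1, decide_false, Bool.false_eq_true, if_false, decide_eq_true_eq]
      by_cases h2 : c = ')' ∨ c = ']' 
      · simp only [h2, if_true]
        cases st with
        | nil => rfl
        | cons p st' =>
          dsimp only
          have hget : pvBracketMap.get? p =
              if p = '(' then some ')' else if p = '[' then some ']' else none := by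
            by_cases hp1 : p = '(' <;> by_cases hp2 : p = '[' <;>
              simp [pvBracketMap, PySem.Dict.get?, hp1, hp2, BEq.comm]
          rw [hget]
          by_cases hp1 : p = '(' <;> by_cases hp2 : p = '[' <;>
            simp [hp1, hp2, pvPair] <;>
            rcases h2 with h2 | h2 <;> subst h2 <;> simp_all
      · simp [h2, ih]

-- stepping the same character on two tails that agree pointwise
theorem pvGoN_cons_congr (c : Char) (X Y : List Char)
    (h : ∀ st, pvGoN X st = pvGoN Y st) (st : List Char) :
    pvGoN (c :: X) st = pvGoN (c :: Y) st := by
  simp only [pvGoN]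
  split_ifs with h1 h2
  · exact h _
  · cases st with
    | nil => rfl
    | cons p st' => by_cases hp : pvPair p c <;> simp [hp, h]
  · exact h _

-- non-bracket characters are skipped
theorem pvGoN_skip (c : Char) (hc : pvIsBr c = false) (l st : List Char) :
    pvGoN (c :: l) st = pvGoN l st := by
  simp only [pvIsBr, List.mem_cons] at hc
  simp only [pvGoN]
  rw [if_neg (by simp_all), if_neg (by simp_all)]

theorem pvGoN_filter (l : List Char) (st : List Char) :
    pvGoN (l.filter pvIsBr) st = pvGoN l st := by
  induction l generalizing st with
  | nil => rfl
  | cons c rest ih =>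
    by_cases hc : pvIsBr c
    · rw [List.filter_cons_of_pos hc]
      exact pvGoN_cons_congr c _ _ (fun st => ih st) st
    · rw [List.filter_cons_of_neg (by simpa using hc),
          pvGoN_skip c (by simpa using hc), ih]

-- cancelling one adjacent matched pair preserves the verdict
theorem pvGoN_pair (a b : Char) (hp : pvPair a b = true) (l st : List Char) :
    pvGoN (a :: b :: l) st = pvGoN l st := by
  simp only [pvPair, Bool.or_eq_true, Bool.and_eq_true, beq_iff_eq] at hp
  rcases hp with ⟨ha, hb⟩ | ⟨ha, hb⟩ <;> subst ha <;> subst hb <;>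
    simp [pvGoN, pvPair]

theorem pvGoN_removePairs (l : List Char) (st : List Char) :
    pvGoN (pvRemovePairs l) st = pvGoN l st := by
  induction l using pvRemovePairs.induct generalizing st with
  | case1 a b rest h ih =>
    rw [pvRemovePairs, if_pos h, ih, pvGoN_pair a b h]
  | case2 a b rest h ih =>
    rw [pvRemovePairs, if_neg h]
    exact pvGoN_cons_congr a _ _ (fun st => ih st) st
  | case3 l h =>
    rw [pvRemovePairs.eq_def]
    cases l with
    | nil => rfl
    | cons a t => cases t with
      | nil => rfl
      | cons b r => exact absurd rfl (h a b r)

theorem pvGoN_reduceLoop (s : List Char) (st : List Char) :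
    pvGoN (pvReduceLoop s) st = pvGoN s st := by
  induction s using pvReduceLoop.induct with
  | case1 s t h => rw [pvReduceLoop, if_pos h]
  | case2 s t h ih =>
    rw [pvReduceLoop, if_neg h, ih, pvGoN_removePairs]

theorem pvRemovePairs_reduceLoop (s : List Char) :
    pvRemovePairs (pvReduceLoop s) = pvReduceLoop s := by
  induction s using pvReduceLoop.induct with
  | case1 s t h => rw [pvReduceLoop, if_pos h]; exact h
  | case2 s t h ih => rw [pvReduceLoop, if_neg h]; exact ih

theorem pvRemovePairs_subset (l : List Char) :
    ∀ c ∈ pvRemovePairs l, c ∈ l := by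
  induction l using pvRemovePairs.induct with
  | case1 a b rest h ih =>
    rw [pvRemovePairs, if_pos h]
    intro c hc; simp [ih c hc]
  | case2 a b rest h ih =>
    rw [pvRemovePairs, if_neg h]
    intro c hc
    rcases List.mem_cons.1 hc with h' | h'
    · simp [h']
    · simpa using Or.inr (ih c h')
  | case3 l h =>
    intro c hc
    rw [pvRemovePairs.eq_def] at hc
    cases l with
    | nil => exact hc
    | cons a t => cases t with
      | nil => exact hc
      | cons b r => exact absurd rfl (h a b r)

theorem pvReduceLoop_brackets (s : List Char)
    (h : ∀ c ∈ s, pvIsBr c = true) :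
    ∀ c ∈ pvReduceLoop s, pvIsBr c = true := by
  induction s using pvReduceLoop.induct with
  | case1 s t hfix => rwa [pvReduceLoop, if_pos hfix]
  | case2 s t hfix ih =>
    rw [pvReduceLoop, if_neg hfix]
    exact ih (fun c hc => h c (pvRemovePairs_subset s c hc))

theorem pvRemovePairs_length_le (l : List Char) :
    (pvRemovePairs l).length ≤ l.length := by
  rcases pvRemovePairs_eq_or_lt l with h | h
  · rw [h]
  · omega

theorem pvFixed_noPair (t : List Char) (hfix : pvRemovePairs t = t) :
    pvHasPair t = false := by
  induction t using pvRemovePairs.induct with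
  | case1 a b rest h ih =>
    exfalso
    rw [pvRemovePairs, if_pos h] at hfix
    have := pvRemovePairs_length_le rest
    have := congrArg List.length hfix
    simp at this; omega
  | case2 a b rest h ih =>
    rw [pvRemovePairs, if_neg h] at hfix
    have hfix' : pvRemovePairs (b :: rest) = b :: rest := by
      injection hfix
    rw [pvHasPair, ih hfix']
    simp only [Bool.or_eq_false_iff]
    exact ⟨Bool.eq_false_iff.mpr h, trivial⟩
  | case3 l h =>
    cases l with
    | nil => rfl
    | cons a t => cases t with
      | nil => rfl
      | cons b r => exact absurd rfl (h a b r)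

-- the rejection invariant: no adjacent matched pair, nonempty situation ⇒ the automaton says false
theorem pvGoN_noadj_false (t : List Char) :
    ∀ st : List Char, (∀ c ∈ t, pvIsBr c = true) → pvHasPair t = false →
    (t = [] → st ≠ []) →
    (∀ c t₁ p st₁, t = c :: t₁ → st = p :: st₁ → (c = ')' ∨ c = ']') → pvPair p c = false) →
    pvGoN t st = false := by
  induction t with
  | nil =>
    intro st _ _ hne _
    have := hne rfl
    cases st with
    | nil => exact absurd rfl this
    | cons p st' => rfl
  | cons c t₁ ih =>
    intro st hb hnp _ htop
    have hc : pvIsBr c = true := hb c (by simp)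
    simp only [pvIsBr, List.mem_cons, List.not_mem_nil, or_false, decide_eq_true_eq] at hc
    have hnp₁ : pvHasPair t₁ = false := by
      cases t₁ with
      | nil => rfl
      | cons b r => rw [pvHasPair] at hnp; exact (Bool.or_eq_false_iff.1 hnp).2
    have hpairhead : ∀ b r, t₁ = b :: r → pvPair c b = false := by
      intro b r hbr
      subst hbr
      rw [pvHasPair] at hnp
      exact (Bool.or_eq_false_iff.1 hnp).1
    rcases hc with hc | hc | hc | hc <;> subst hc
    · -- '(' : push
      rw [show pvGoN ('(' :: t₁) st = pvGoN t₁ ('(' :: st) from by simp [pvGoN]]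
      refine ih ('(' :: st) (fun x hx => hb x (by simp [hx])) hnp₁ (fun _ => by simp) ?_
      intro d t₂ p st₂ hd hst hcl
      injection hst with hp _
      subst hp
      have := hpairhead d t₂ hd
      exact this
    · -- ')' : pop
      cases st with
      | nil => simp [pvGoN]
      | cons p st' =>
        have := htop ')' t₁ p st' rfl rfl (Or.inl rfl)
        simp [pvGoN, this]
    · -- '[' : push
      rw [show pvGoN ('[' :: t₁) st = pvGoN t₁ ('[' :: st) from by simp [pvGoN]]
      refine ih ('[' :: st) (fun x hx => hb x (by simp [hx])) hnp₁ (fun _ => by simp) ?_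
      intro d t₂ p st₂ hd hst hcl
      injection hst with hp _
      subst hp
      exact hpairhead d t₂ hd
    · -- ']' : pop
      cases st with
      | nil => simp [pvGoN]
      | cons p st' =>
        have := htop ']' t₁ p st' rfl rfl (Or.inr rfl)
        simp [pvGoN, this]

theorem pvGoN_fixed_false (t : List Char)
    (hb : ∀ c ∈ t, pvIsBr c = true)
    (hfix : pvRemovePairs t = t) (hne : t ≠ []) :
    pvGoN t [] = false := by
  refine pvGoN_noadj_false t [] hb (pvFixed_noPair t hfix) (fun h => absurd h hne) ?_
  intro c t₁ p st₁ _ hst _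
  exact absurd hst (by simp)

-- ===== VERDICT (by name: the statement is the Claim_ definition above) =====
theorem do_brackets_match_spec : Claim_equal_do_brackets_match := by
  intro p _
  unfold Spec_do_brackets_match do_brackets_match do_brackets_match_alt
  have hfeq : (fun c => decide (c ∈ ['(', ')', '[', ']'])) = pvIsBr := by
    funext c; simp [pvIsBr]
  simp only [hfeq]
  set f := p.toList.filter pvIsBr with hf
  have hbr : ∀ c ∈ f, pvIsBr c = true := by
    intro c hc; rw [hf] at hc; exact List.of_mem_filter hc
  rw [pvGoA_eq_goN, ← pvGoN_filter p.toList [], ← hf, ← pvGoN_reduceLoop f []]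
  by_cases h : pvReduceLoop f = []
  · rw [h]; rfl
  · rw [pvGoN_fixed_false _ (pvReduceLoop_brackets f hbr) (pvRemovePairs_reduceLoop f) h]
    simp [h]
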